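-- pv_equiv track=rewrite | github.com/danieleschmidt/vislang-ultralow-resource | src/vislang_ultralow/research/federated_learning.py | _group_by_languages
-- ===== SOURCE A (Python) =====
-- from typing import Dict, List, Optional, Tuple, Any, Union
--
-- def _group_by_languages(client_updates: List[Dict]) -> Dict[str, List[Dict]]:
--     """Group client updates by language combinations."""
--     groups = {}
--
--     for update in client_updates:
--         lang_key = "_".join(sorted(update["languages"]))
--         if lang_key not in groups:
--             groups[lang_key] = []
--         groups[lang_key].append(update)
--
--     return groups
-- ===== SOURCE B (Python) =====
-- def _group_by_languages(client_updates):
--     """Group client updates by language combinations (two-pass: key, dedup keys, filter per key)."""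
--     keyed = [("_".join(sorted(u["languages"])), u) for u in client_updates]
--     keys = dict.fromkeys(k for k, _ in keyed)
--     return {k: [u for kk, u in keyed if kk == k] for k in keys}
-- ===== Notes on version B (the rewrite author's own statement) =====
-- stated objective: alternative
-- what changed: Replaces A's single-pass dict accumulation with a two-pass strategy: key every update once, dedup the keys in first-occurrence order, then build each group by filtering the keyed list.
import Mathlib
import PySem

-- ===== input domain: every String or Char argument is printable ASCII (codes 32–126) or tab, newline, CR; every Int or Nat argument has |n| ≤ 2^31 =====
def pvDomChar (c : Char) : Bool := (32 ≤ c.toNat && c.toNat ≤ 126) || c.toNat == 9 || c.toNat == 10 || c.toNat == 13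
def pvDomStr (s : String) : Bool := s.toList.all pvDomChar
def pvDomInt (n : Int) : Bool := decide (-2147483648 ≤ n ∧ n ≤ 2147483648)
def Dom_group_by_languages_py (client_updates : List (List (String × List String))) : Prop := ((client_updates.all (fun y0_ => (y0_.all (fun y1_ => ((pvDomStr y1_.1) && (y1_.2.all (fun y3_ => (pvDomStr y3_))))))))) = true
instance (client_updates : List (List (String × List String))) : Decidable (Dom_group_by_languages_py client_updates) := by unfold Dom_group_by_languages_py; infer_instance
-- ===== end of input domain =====

-- B replaces A's single-pass dict accumulation by a two-pass strategy (key every update once,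
-- dedup the keys in first-occurrence order, then build each group by a filter scan); alternative, not faster.

-- ===== PORT A =====
-- lang_key = "_".join(sorted(update["languages"]))  (update["languages"] requires the key: Pre_)
def pvLangKeyA (update : List (String × List String)) : String :=
  PySem.Str.join "_" (PySem.List.sorted ((PySem.Dict.mk update).getD "languages" []) (fun s => s) false)

def group_by_languages_py (client_updates : List (List (String × List String))) : List (String × List (List (String × List String))) :=
  (client_updates.foldl
    (fun groups update =>
      let lang_key := pvLangKeyA update
      -- if lang_key not in groups: groups[lang_key] = []
      let groups := if groups.contains lang_key then groups else groups.insert lang_key []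
      -- groups[lang_key].append(update)
      groups.insert lang_key (groups.getD lang_key [] ++ [update]))
    PySem.Dict.empty).items

-- ===== PORT B =====
def pvLangKeyB (u : List (String × List String)) : String :=
  PySem.Str.join "_" (PySem.List.sorted ((PySem.Dict.mk u).getD "languages" []) (fun s => s) false)

def group_by_languages_py_alt (client_updates : List (List (String × List String))) : List (String × List (List (String × List String))) :=
  let keyed := client_updates.map (fun u => (pvLangKeyB u, u))
  let keys := PySem.List.dedup (keyed.map Prod.fst)
  keys.map (fun k => (k, (keyed.filter (fun p => p.1 == k)).map Prod.snd))

-- ===== PRECONDITION & SPEC =====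
-- Pre_ excludes exactly the inputs where some update lacks the "languages" key, on which A raises KeyError.
def Pre_group_by_languages_py (client_updates : List (List (String × List String))) : Prop :=
  (client_updates.all (fun u => u.any (fun p => p.1 == "languages"))) = true
instance (client_updates : List (List (String × List String))) : Decidable (Pre_group_by_languages_py client_updates) := by unfold Pre_group_by_languages_py; infer_instance

def pvWitness_group_by_languages_py : (List (List (String × List String))) :=
  [[("languages", ["fr", "en"])], [("languages", ["en", "fr"]), ("weights", ["w"])], [("languages", [])]]

def Spec_group_by_languages_py (client_updates : List (List (String × List String))) (out : List (String × List (List (String × List String)))) : Prop := out = group_by_languages_py_alt client_updates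
instance (client_updates : List (List (String × List String))) (out : List (String × List (List (String × List String)))) : Decidable (Spec_group_by_languages_py client_updates out) := by unfold Spec_group_by_languages_py; infer_instance

-- ===== CLAIM (what is proved, stated in full; the proofs are below) =====
def Claim_equal_group_by_languages_py : Prop := ∀ (client_updates : List (List (String × List String))), Dom_group_by_languages_py client_updates → Pre_group_by_languages_py client_updates → Spec_group_by_languages_py client_updates (group_by_languages_py client_updates)

-- ===== LEMMAS AND PROOFS =====

-- A's loop body (conditional empty-group creation, then append) is one `modify`.
theorem pvStepA_eq (d : PySem.Dict String (List (List (String × List String)))) (u : List (String × List String)) :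
    (let lang_key := pvLangKeyA u
     let groups := if d.contains lang_key then d else d.insert lang_key []
     groups.insert lang_key (groups.getD lang_key [] ++ [u]))
    = d.modify (pvLangKeyA u) [] (fun l => l ++ [u]) := by
  set k := pvLangKeyA u
  by_cases h : d.contains k = true
  · simp [h, PySem.Dict.modify]
  · simp only [Bool.not_eq_true] at h
    simp [h, PySem.Dict.modify, PySem.Dict.getD_insert_self, PySem.Dict.insert_insert_self,
      PySem.Dict.getD_of_not_contains d [] h]

theorem pvFoldA_eq (client_updates : List (List (String × List String))) :
    client_updates.foldl
      (fun groups update =>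
        let lang_key := pvLangKeyA update
        let groups := if groups.contains lang_key then groups else groups.insert lang_key []
        groups.insert lang_key (groups.getD lang_key [] ++ [update]))
      PySem.Dict.empty
    = (client_updates.map (fun u => (pvLangKeyA u, u))).foldl
        (fun d p => d.modify p.1 [] (fun l => l ++ [p.2])) PySem.Dict.empty := by
  rw [List.foldl_map]
  exact List.foldl_ext _ _ _ (fun d u _ => pvStepA_eq d u)

-- ===== VERDICT (by name: the statement is the Claim_ definition above) =====
theorem group_by_languages_py_spec : Claim_equal_group_by_languages_py := by
  intro cu _ _
  show group_by_languages_py cu = group_by_languages_py_alt cu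
  unfold group_by_languages_py group_by_languages_py_alt
  rw [pvFoldA_eq]
  set l := cu.map (fun u => (pvLangKeyA u, u)) with hl
  have hkey : (cu.map (fun u => (pvLangKeyB u, u))) = l := rfl
  rw [hkey]
  set d := l.foldl (fun d p => d.modify p.1 [] (fun l => l ++ [p.2])) PySem.Dict.empty with hd
  have hnodup : d.keys.Nodup := by
    rw [hd]
    have := PySem.Dict.nodup_keys_foldl_modify_key (κ := String) l (fun p => p.1) []
      (fun d p _ => (d.getD p.1 [] ++ [p.2])) PySem.Dict.empty (by simp [PySem.Dict.keys_empty])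
    simpa [PySem.Dict.modify] using this
  have hkeys : d.keys = PySem.List.dedup (l.map Prod.fst) := by
    rw [hd]
    have := PySem.Dict.keys_foldl_modify_key (κ := String) l (fun p => p.1) []
      (fun d p _ => (d.getD p.1 [] ++ [p.2])) PySem.Dict.empty
    simpa [PySem.Dict.modify, PySem.Dict.keys_empty] using this
  rw [PySem.Dict.items_eq_map_keys d hnodup [], hkeys]
  refine List.map_congr_left (fun k _ => ?_)
  have hg : d.getD k [] = (l.filter (fun p => p.1 == k)).map (fun p => p.2) := by
    rw [hd, PySem.Dict.getD_foldl_modify_append]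
    simp [PySem.Dict.getD_empty]
  rw [hg]
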